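-- pv_equiv track=rewrite | github.com/jclements3/trefoil | scripts/optimize_harp_voicings.py | _select_spaced_subset
-- ===== SOURCE A (Python) =====
-- def _select_spaced_subset(midis, target, scale_midis):
--     """From a sorted list of midis, select `target` notes that are well-spaced."""
--     if len(midis) <= target:
--         return midis
--
--     # Always keep lowest and highest
--     must_keep = {midis[0], midis[-1]}
--
--     # Score all subsets of size `target` that include endpoints
--     # For efficiency, use greedy selection based on spacing
--     selected = [midis[0]]
--     remaining = [m for m in midis[1:-1]]
--     remaining_set = list(remaining)
--
--     while len(selected) < target - 1 and remaining_set: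
--         best_m = None
--         best_min_gap = -1
--         for m in remaining_set:
--             # Minimum gap to any already-selected note
--             min_gap = min(abs(m - s) for s in selected)
--             if min_gap > best_min_gap:
--                 best_min_gap = min_gap
--                 best_m = m
--         if best_m is not None:
--             selected.append(best_m)
--             remaining_set.remove(best_m)
--         else:
--             break
--
--     selected.append(midis[-1])
--     return sorted(selected)[:target]
-- ===== SOURCE B (Python) =====
-- def _select_spaced_subset(midis, target, scale_midis):
--     """From a sorted list of midis, select `target` notes that are well-spaced.
--
--     Farthest-point greedy like the original, but each remaining note carries its
--     current minimum gap to the selected set, updated incrementally after each pick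
--     (O(n) per pick instead of recomputing a min over `selected` for every candidate).
--     """
--     if len(midis) <= target:
--         return midis
--     first, last = midis[0], midis[-1]
--     selected = [first]
--     rem = [(m, abs(m - first)) for m in midis[1:-1]]
--     while len(selected) < target - 1 and rem:
--         bm, bg = rem[0]
--         for m, g in rem[1:]:
--             if g > bg:
--                 bm, bg = m, g
--         rem.remove((bm, bg))
--         selected.append(bm)
--         rem = [(m, min(g, abs(m - bm))) for (m, g) in rem]
--     selected.append(last)
--     return sorted(selected)[:target]
-- ===== Notes on version B (the rewrite author's own statement) =====
-- stated objective: faster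
-- what changed: B keeps, for every remaining note, its current minimum gap to the selected set and updates it in O(1) per note after each pick, instead of A's recomputing min(|m-s| for s in selected) for every candidate in every round.
import Mathlib
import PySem

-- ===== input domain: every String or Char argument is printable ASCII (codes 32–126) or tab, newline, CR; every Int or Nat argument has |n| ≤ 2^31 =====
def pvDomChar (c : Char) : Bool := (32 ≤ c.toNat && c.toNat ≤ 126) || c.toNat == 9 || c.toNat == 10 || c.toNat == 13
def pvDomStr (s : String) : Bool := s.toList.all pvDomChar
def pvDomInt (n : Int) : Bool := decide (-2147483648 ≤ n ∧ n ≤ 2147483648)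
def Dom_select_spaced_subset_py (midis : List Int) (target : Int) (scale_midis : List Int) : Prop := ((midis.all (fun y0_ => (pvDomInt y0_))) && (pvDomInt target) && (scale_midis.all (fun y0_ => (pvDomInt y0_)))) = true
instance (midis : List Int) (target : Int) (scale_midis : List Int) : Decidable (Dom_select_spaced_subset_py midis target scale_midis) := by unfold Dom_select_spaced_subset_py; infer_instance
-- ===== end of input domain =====

-- B replaces A's per-round recomputation of each candidate's min gap to `selected`
-- by an incrementally maintained gap per remaining note (objective: faster).


-- ===== PORT A =====
-- min(abs(m - s) for s in selected)   (selected is never empty when A evaluates this)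
def pvMinGap (m : Int) (sel : List Int) : Int :=
  match sel with
  | [] => 0
  | s :: rest => rest.foldl (fun a t => min a |m - t|) |m - s|

-- the `for m in remaining_set` scan: (best_m, best_min_gap), starting (None, -1)
def pvABest (sel : List Int) (rem : List Int) : Option Int × Int :=
  rem.foldl (fun st m =>
    let g := pvMinGap m sel
    if g > st.2 then (some m, g) else st) (none, -1)

-- the while-loop; fuel = |remaining_set| bounds the iterations (one removal each round)
def pvALoop : Nat → List Int → List Int → Int → List Int
  | 0, sel, _, _ => sel
  | fuel+1, sel, rem, target =>
    if (sel.length : Int) < target - 1 ∧ rem ≠ [] then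
      match (pvABest sel rem).1 with
      | some bm => pvALoop fuel (sel ++ [bm]) ((PySem.List.remove? rem bm).getD rem) target
      | none => sel
    else sel

def select_spaced_subset_py (midis : List Int) (target : Int) (scale_midis : List Int) : List Int :=
  if (midis.length : Int) ≤ target then midis
  else
    let first := PySem.List.pyGetD midis 0 0        -- midis[0]; Pre_ rules out the IndexError case
    let last := PySem.List.pyGetD midis (-1) 0      -- midis[-1]
    let remaining := PySem.List.slice midis (some 1) (some (-1))
    let sel := pvALoop remaining.length [first] remaining target
    PySem.List.slice (PySem.List.sorted (sel ++ [last]) (fun x => x) false) none (some target)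

-- ===== PORT B =====
-- the `for m, g in rem[1:]` scan starting from rem[0]: first pair with maximal gap
def pvBBest (p : Int × Int) (rest : List (Int × Int)) : Int × Int :=
  rest.foldl (fun b q => if q.2 > b.2 then q else b) p

def pvBLoop : Nat → List Int → List (Int × Int) → Int → List Int
  | 0, sel, _, _ => sel
  | fuel+1, sel, rem, target =>
    if (sel.length : Int) < target - 1 ∧ rem ≠ [] then
      match rem with
      | [] => sel
      | p :: rest =>
        let b := pvBBest p rest
        let rem' := (PySem.List.remove? rem b).getD rem
        pvBLoop fuel (sel ++ [b.1]) (rem'.map (fun q => (q.1, min q.2 |q.1 - b.1|))) target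
    else sel

def select_spaced_subset_py_alt (midis : List Int) (target : Int) (scale_midis : List Int) : List Int :=
  if (midis.length : Int) ≤ target then midis
  else
    let first := PySem.List.pyGetD midis 0 0
    let last := PySem.List.pyGetD midis (-1) 0
    let rem := (PySem.List.slice midis (some 1) (some (-1))).map (fun m => (m, |m - first|))
    let sel := pvBLoop rem.length [first] rem target
    PySem.List.slice (PySem.List.sorted (sel ++ [last]) (fun x => x) false) none (some target)

-- ===== PRECONDITION & SPEC =====
-- Pre_ excludes exactly the inputs where Python A raises: empty midis with target < 0
-- (len(midis) <= target is then False and midis[0] raises IndexError; B raises there too).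
def Pre_select_spaced_subset_py (midis : List Int) (target : Int) (scale_midis : List Int) : Prop :=
  ¬(midis = [] ∧ target < 0)
instance (midis : List Int) (target : Int) (scale_midis : List Int) : Decidable (Pre_select_spaced_subset_py midis target scale_midis) := by unfold Pre_select_spaced_subset_py; infer_instance

def pvWitness_select_spaced_subset_py : List Int × Int × List Int := ([1, 5, 9, 12], 3, [])

def Spec_select_spaced_subset_py (midis : List Int) (target : Int) (scale_midis : List Int) (out : List Int) : Prop := out = select_spaced_subset_py_alt midis target scale_midis
instance (midis : List Int) (target : Int) (scale_midis : List Int) (out : List Int) : Decidable (Spec_select_spaced_subset_py midis target scale_midis out) := by unfold Spec_select_spaced_subset_py; infer_instance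

-- ===== CLAIM (what is proved, stated in full; the proofs are below) =====
def Claim_equal_select_spaced_subset_py : Prop := ∀ (midis : List Int) (target : Int) (scale_midis : List Int), Dom_select_spaced_subset_py midis target scale_midis → Pre_select_spaced_subset_py midis target scale_midis → Spec_select_spaced_subset_py midis target scale_midis (select_spaced_subset_py midis target scale_midis)

-- ===== LEMMAS AND PROOFS =====

theorem pvWitness_ok :
    Dom_select_spaced_subset_py pvWitness_select_spaced_subset_py.1 pvWitness_select_spaced_subset_py.2.1 pvWitness_select_spaced_subset_py.2.2 ∧
    Pre_select_spaced_subset_py pvWitness_select_spaced_subset_py.1 pvWitness_select_spaced_subset_py.2.1 pvWitness_select_spaced_subset_py.2.2 := by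
  decide

theorem pvFold_nonneg (m : Int) (rest : List Int) (a : Int) (ha : 0 ≤ a) :
    0 ≤ rest.foldl (fun a t => min a |m - t|) a := by
  induction rest generalizing a with
  | nil => simpa using ha
  | cons t ts ih => exact ih _ (le_min ha (abs_nonneg _))

theorem pvMinGap_nonneg (m : Int) (sel : List Int) (h : sel ≠ []) : 0 ≤ pvMinGap m sel := by
  cases sel with
  | nil => exact absurd rfl h
  | cons s rest => exact pvFold_nonneg m rest _ (abs_nonneg _)

theorem pvMinGap_append (m b : Int) (sel : List Int) (h : sel ≠ []) :
    pvMinGap m (sel ++ [b]) = min (pvMinGap m sel) |m - b| := by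
  cases sel with
  | nil => exact absurd rfl h
  | cons s rest => simp [pvMinGap, List.foldl_append]

theorem pvBBest_mem (p : Int × Int) (rest : List (Int × Int)) : pvBBest p rest ∈ p :: rest := by
  induction rest generalizing p with
  | nil => simp [pvBBest]
  | cons q qs ih =>
    have h := ih (if q.2 > p.2 then q else p)
    have he : pvBBest p (q :: qs) = pvBBest (if q.2 > p.2 then q else p) qs := rfl
    rw [he]
    rcases List.mem_cons.1 h with h1 | h1
    · rw [h1]; split <;> simp
    · exact List.mem_cons_of_mem _ (List.mem_cons_of_mem _ h1)

-- A's scan after it has installed a first candidate equals B's scan, elementwise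
theorem pvScan_aux (sel : List Int) (rest : List (Int × Int)) (bm bg : Int)
    (hinv : ∀ q ∈ rest, q.2 = pvMinGap q.1 sel) :
    (rest.map Prod.fst).foldl
      (fun st m => let g := pvMinGap m sel; if g > st.2 then (some m, g) else st)
      ((some bm : Option Int), bg)
    = (some (pvBBest (bm, bg) rest).1, (pvBBest (bm, bg) rest).2) := by
  induction rest generalizing bm bg with
  | nil => simp [pvBBest]
  | cons q qs ih =>
    have hq : q.2 = pvMinGap q.1 sel := hinv q (by simp)
    have hrest : ∀ r ∈ qs, r.2 = pvMinGap r.1 sel := fun r hr => hinv r (by simp [hr])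
    have hstep : ((q :: qs).map Prod.fst).foldl
        (fun st m => let g := pvMinGap m sel; if g > st.2 then (some m, g) else st)
        ((some bm : Option Int), bg)
      = (qs.map Prod.fst).foldl
        (fun st m => let g := pvMinGap m sel; if g > st.2 then (some m, g) else st)
        (if pvMinGap q.1 sel > bg then ((some q.1 : Option Int), pvMinGap q.1 sel) else (some bm, bg)) := rfl
    rw [hstep]
    have hbb : pvBBest (bm, bg) (q :: qs) = pvBBest (if q.2 > bg then q else (bm, bg)) qs := rfl
    rw [hbb]
    by_cases hgt : pvMinGap q.1 sel > bg
    · rw [if_pos hgt, if_pos (show q.2 > bg by omega)]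
      have h2 := ih q.1 q.2 hrest
      simp only [Prod.mk.eta] at h2
      rw [hq] at h2
      exact h2
    · rw [if_neg hgt, if_neg (show ¬ q.2 > bg by omega)]
      exact ih bm bg hrest

theorem pvScan_eq (sel : List Int) (p : Int × Int) (rest : List (Int × Int)) (hsel : sel ≠ [])
    (hinv : ∀ q ∈ p :: rest, q.2 = pvMinGap q.1 sel) :
    pvABest sel ((p :: rest).map Prod.fst)
      = (some (pvBBest p rest).1, (pvBBest p rest).2) := by
  have hp : p.2 = pvMinGap p.1 sel := hinv p (by simp)
  have hpos : pvMinGap p.1 sel > -1 := by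
    have := pvMinGap_nonneg p.1 sel hsel; omega
  have hstep : pvABest sel ((p :: rest).map Prod.fst)
      = (rest.map Prod.fst).foldl
          (fun st m => let g := pvMinGap m sel; if g > st.2 then (some m, g) else st)
          (if pvMinGap p.1 sel > -1 then ((some p.1 : Option Int), pvMinGap p.1 sel) else (none, -1)) := rfl
  rw [hstep, if_pos hpos]
  have h2 := pvScan_aux sel rest p.1 p.2 (fun r hr => hinv r (by simp [hr]))
  simp only [Prod.mk.eta] at h2
  rw [hp] at h2
  exact h2

-- B removes the chosen (value, gap) pair exactly where A removes the chosen value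
theorem pvRemove_eq (sel : List Int) (rem : List (Int × Int)) (b : Int × Int)
    (hinv : ∀ q ∈ rem, q.2 = pvMinGap q.1 sel) (hb : b.2 = pvMinGap b.1 sel) :
    PySem.List.remove? (rem.map Prod.fst) b.1
      = (PySem.List.remove? rem b).map (List.map Prod.fst) := by
  induction rem with
  | nil => simp [PySem.List.remove?]
  | cons q qs ih =>
    by_cases hq : q.1 = b.1
    · have hq2 : q = b := by
        have h1 := hinv q (by simp)
        have h2 : q.2 = b.2 := by rw [h1, hq, hb]
        exact Prod.ext hq h2
      subst hq2
      simp [PySem.List.remove?_cons_self]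
    · have hne : q ≠ b := fun h => hq (by rw [h])
      rw [List.map_cons, PySem.List.remove?_cons_of_ne _ hq,
          PySem.List.remove?_cons_of_ne _ hne,
          ih (fun r hr => hinv r (by simp [hr]))]
      cases PySem.List.remove? qs b <;> simp

-- main invariant: B's carried gaps are exactly A's recomputed min gaps
theorem pvLoop_eq (fuel : Nat) (sel : List Int) (rem : List (Int × Int)) (target : Int)
    (hsel : sel ≠ []) (hinv : ∀ q ∈ rem, q.2 = pvMinGap q.1 sel) :
    pvALoop fuel sel (rem.map Prod.fst) target = pvBLoop fuel sel rem target := by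
  induction fuel generalizing sel rem with
  | zero => rfl
  | succ f ih =>
    simp only [pvALoop, pvBLoop]
    by_cases hc : (sel.length : Int) < target - 1 ∧ rem ≠ []
    · have hcA : (sel.length : Int) < target - 1 ∧ rem.map Prod.fst ≠ [] := ⟨hc.1, by simpa using hc.2⟩
      rw [if_pos hcA, if_pos hc]
      obtain ⟨p, rest, rfl⟩ : ∃ p rest, rem = p :: rest := by
        cases rem with
        | nil => exact absurd rfl hc.2
        | cons p rest => exact ⟨p, rest, rfl⟩
      rw [pvScan_eq sel p rest hsel hinv]
      have hbmem : pvBBest p rest ∈ p :: rest := pvBBest_mem p rest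
      have hbg : (pvBBest p rest).2 = pvMinGap (pvBBest p rest).1 sel := hinv _ hbmem
      have hrm := PySem.List.remove?_eq_some_erase (p :: rest) (pvBBest p rest) hbmem
      have hrmA := pvRemove_eq sel (p :: rest) (pvBBest p rest) hinv hbg
      rw [hrm] at hrmA
      simp only [hrm, hrmA, Option.getD_some, Option.map_some]
      have hmap : ((p :: rest).erase (pvBBest p rest)).map Prod.fst
          = (((p :: rest).erase (pvBBest p rest)).map
              (fun q => (q.1, min q.2 |q.1 - (pvBBest p rest).1|))).map Prod.fst := by
        simp [List.map_map, Function.comp]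
      rw [hmap]
      apply ih
      · simp
      · intro q hqm
        simp only [List.mem_map] at hqm
        obtain ⟨r, hr, rfl⟩ := hqm
        have hr' : r ∈ p :: rest := List.mem_of_mem_erase hr
        have hrg := hinv r hr'
        rw [pvMinGap_append r.1 (pvBBest p rest).1 sel hsel, ← hrg]
    · have hcA : ¬ ((sel.length : Int) < target - 1 ∧ rem.map Prod.fst ≠ []) := by
        intro h
        exact hc ⟨h.1, by intro h2; exact h.2 (by simp [h2])⟩
      rw [if_neg hcA, if_neg hc]

-- the common tail of both ports, with the two loops proved equal
theorem pvBody_eq (midis : List Int) (target : Int) :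
    PySem.List.slice (PySem.List.sorted
      (pvALoop (PySem.List.slice midis (some 1) (some (-1))).length
        [PySem.List.pyGetD midis 0 0] (PySem.List.slice midis (some 1) (some (-1))) target
       ++ [PySem.List.pyGetD midis (-1) 0]) (fun x => x) false) none (some target)
  = PySem.List.slice (PySem.List.sorted
      (pvBLoop ((PySem.List.slice midis (some 1) (some (-1))).map
          (fun m => (m, |m - PySem.List.pyGetD midis 0 0|))).length
        [PySem.List.pyGetD midis 0 0]
        ((PySem.List.slice midis (some 1) (some (-1))).map
          (fun m => (m, |m - PySem.List.pyGetD midis 0 0|))) target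
       ++ [PySem.List.pyGetD midis (-1) 0]) (fun x => x) false) none (some target) := by
  have h3 : PySem.List.slice midis (some 1) (some (-1))
      = ((PySem.List.slice midis (some 1) (some (-1))).map
          (fun m => (m, |m - PySem.List.pyGetD midis 0 0|))).map Prod.fst := by
    simp [List.map_map, Function.comp_def]
  have hlen : (PySem.List.slice midis (some 1) (some (-1))).length
      = ((PySem.List.slice midis (some 1) (some (-1))).map
          (fun m => (m, |m - PySem.List.pyGetD midis 0 0|))).length := by
    simp
  have hsel : pvALoop (PySem.List.slice midis (some 1) (some (-1))).length
        [PySem.List.pyGetD midis 0 0] (PySem.List.slice midis (some 1) (some (-1))) target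
      = pvBLoop ((PySem.List.slice midis (some 1) (some (-1))).map
          (fun m => (m, |m - PySem.List.pyGetD midis 0 0|))).length
        [PySem.List.pyGetD midis 0 0]
        ((PySem.List.slice midis (some 1) (some (-1))).map
          (fun m => (m, |m - PySem.List.pyGetD midis 0 0|))) target := by
    have hloop := pvLoop_eq ((PySem.List.slice midis (some 1) (some (-1))).map
          (fun m => (m, |m - PySem.List.pyGetD midis 0 0|))).length
        [PySem.List.pyGetD midis 0 0]
        ((PySem.List.slice midis (some 1) (some (-1))).map
          (fun m => (m, |m - PySem.List.pyGetD midis 0 0|))) target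
        (by simp)
        (by
          intro q hqm
          simp only [List.mem_map] at hqm
          obtain ⟨r, hr, rfl⟩ := hqm
          rfl)
    rw [← h3] at hloop
    rw [hlen]
    exact hloop
  rw [hsel]

-- ===== VERDICT (by name: the statement is the Claim_ definition above) =====
theorem select_spaced_subset_py_spec : Claim_equal_select_spaced_subset_py := by
  intro midis target scale_midis _ _
  unfold Spec_select_spaced_subset_py select_spaced_subset_py select_spaced_subset_py_alt
  by_cases h : (midis.length : Int) ≤ target
  · rw [if_pos h, if_pos h]
  · rw [if_neg h, if_neg h]
    exact pvBody_eq midis target
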